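-- pv_equiv track=rewrite | github.com/ravardh/GIETU_SuperCoderBatch2 | _14-03-2023.py | max_treasure_locations
-- ===== SOURCE A (Python) =====
-- def max_treasure_locations(locations, compass_range):
--     max_locations = 0
--     for i in range(len(locations)):
--         current_locations = set()
--         for j in range(i, min(len(locations), i + compass_range)):
--             current_locations.add(locations[j])
--             max_locations = max(max_locations, len(current_locations))
--     return max_locations
-- ===== SOURCE B (Python) =====
-- def max_treasure_locations(locations, compass_range):
--     n = len(locations)
--     k = min(compass_range, n)
--     if k <= 0:
--         return 0
--     counts = {}
--     distinct = 0
--     best = 0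
--     for j, x in enumerate(locations):
--         counts[x] = counts.get(x, 0) + 1
--         if counts[x] == 1:
--             distinct += 1
--         if j >= k:
--             y = locations[j - k]
--             counts[y] -= 1
--             if counts[y] == 0:
--                 distinct -= 1
--         if j >= k - 1:
--             best = max(best, distinct)
--     return best
-- ===== Notes on version B (the rewrite author's own statement) =====
-- stated objective: faster
-- what changed: Replaces the O(n*range) rebuild-a-set-per-start-index nested loops by a single O(n) sliding window of fixed size min(range, n) with a count dict that tracks the number of distinct elements incrementally.
import Mathlib
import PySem

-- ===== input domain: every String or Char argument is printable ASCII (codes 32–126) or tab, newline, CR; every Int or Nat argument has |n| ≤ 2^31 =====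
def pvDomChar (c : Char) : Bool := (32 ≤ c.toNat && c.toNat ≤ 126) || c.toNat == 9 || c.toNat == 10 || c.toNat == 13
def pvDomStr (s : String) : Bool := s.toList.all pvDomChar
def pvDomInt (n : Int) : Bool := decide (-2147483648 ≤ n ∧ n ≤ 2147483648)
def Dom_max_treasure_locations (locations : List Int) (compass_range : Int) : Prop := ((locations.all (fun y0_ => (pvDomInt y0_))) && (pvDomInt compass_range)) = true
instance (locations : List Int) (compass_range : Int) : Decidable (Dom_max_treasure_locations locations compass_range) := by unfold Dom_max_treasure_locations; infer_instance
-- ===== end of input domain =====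

-- B replaces A's O(n*range) per-start-index set rebuilding by one O(n) sliding window of
-- fixed size min(range, n) with a count dict tracking the number of distinct elements.

-- ===== PORT A =====
-- literal transliteration of A: for each start i, grow a set over the clamped window and
-- update the running max after every insertion
def max_treasure_locations (locations : List Int) (compass_range : Int) : Int :=
  (PySem.List.pyRange 0 (PySem.List.len locations) 1).foldl
    (fun max_locations i =>
      ((PySem.List.pyRange i (min (PySem.List.len locations) (i + compass_range)) 1).foldl
        (fun (st : PySem.Set Int × Int) j =>
          let s := PySem.Set.add st.1 (PySem.List.pyGetD locations j 0)
          (s, max st.2 (PySem.Set.len s)))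
        ((PySem.Set.empty : PySem.Set Int), max_locations)).2)
    0

-- ===== PORT B =====
-- literal transliteration of B (Source B): sliding window with a count dict.
-- 'counts[y] -= 1' is ported as 'modify y 0 (· - 1)': exact, since y is always a key there.
def max_treasure_locations_alt (locations : List Int) (compass_range : Int) : Int :=
  let n := PySem.List.len locations
  let k := min compass_range n
  if k ≤ 0 then 0
  else
    ((PySem.List.enumerate locations).foldl
      (fun (st : PySem.Dict Int Int × Int × Int) jx =>
        let j := jx.1
        let x := jx.2
        let counts := st.1.modify x 0 (· + 1)
        let distinct := if counts.getD x 0 == 1 then st.2.1 + 1 else st.2.1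
        let cd : PySem.Dict Int Int × Int :=
          if k ≤ j then
            let y := PySem.List.pyGetD locations (j - k) 0
            let counts2 := counts.modify y 0 (· - 1)
            (counts2, if counts2.getD y 0 == 0 then distinct - 1 else distinct)
          else (counts, distinct)
        let best := if k - 1 ≤ j then max st.2.2 cd.2 else st.2.2
        (cd.1, cd.2, best))
      ((PySem.Dict.empty : PySem.Dict Int Int), 0, 0)).2.2

-- ===== PRECONDITION & SPEC =====
def Spec_max_treasure_locations (locations : List Int) (compass_range : Int) (out : Int) : Prop := out = max_treasure_locations_alt locations compass_range
instance (locations : List Int) (compass_range : Int) (out : Int) : Decidable (Spec_max_treasure_locations locations compass_range out) := by unfold Spec_max_treasure_locations; infer_instance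

-- ===== CLAIM (what is proved, stated in full; the proofs are below) =====
def Claim_equal_max_treasure_locations : Prop := ∀ (locations : List Int) (compass_range : Int), Dom_max_treasure_locations locations compass_range → Spec_max_treasure_locations locations compass_range (max_treasure_locations locations compass_range)

-- ===== LEMMAS AND PROOFS =====

-- number of distinct elements of a list
def DN (w : List Int) : Nat := (PySem.Set.ofList w).length

theorem DN_eq_card (w : List Int) : DN w = w.toFinset.card := by
  have hperm : (PySem.Set.ofList w).Perm w.dedup :=
    (List.perm_ext_iff_of_nodup (PySem.Set.nodup_ofList w) (List.nodup_dedup w)).mpr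
      (by intro a; simp [PySem.Set.mem_ofList, List.mem_dedup])
  rw [DN, hperm.length_eq, List.card_toFinset]

theorem DN_append (w : List Int) (x : Int) :
    DN (w ++ [x]) = if x ∈ w then DN w else DN w + 1 := by
  simp only [DN_eq_card, List.toFinset_append, List.toFinset_cons, List.toFinset_nil,
    insert_empty_eq, Finset.union_singleton]
  by_cases hx : x ∈ w
  · rw [if_pos hx, Finset.insert_eq_self.mpr (List.mem_toFinset.mpr hx)]
  · rw [if_neg hx, Finset.card_insert_of_notMem (by simpa using hx)]

theorem DN_cons (y : Int) (t : List Int) :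
    DN (y :: t) = if y ∈ t then DN t else DN t + 1 := by
  simp only [DN_eq_card, List.toFinset_cons]
  by_cases hy : y ∈ t
  · rw [if_pos hy, Finset.insert_eq_self.mpr (List.mem_toFinset.mpr hy)]
  · rw [if_neg hy, Finset.card_insert_of_notMem (by simpa using hy)]

theorem DN_mono {w1 w2 : List Int} (h : w1 ⊆ w2) : DN w1 ≤ DN w2 := by
  simp only [DN_eq_card]
  exact Finset.card_le_card (fun a ha => List.mem_toFinset.mpr (h (List.mem_toFinset.mp ha)))

-- A's window as a list of values
def winA (l : List Int) (a b : Int) : List Int :=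
  (PySem.List.pyRange a b 1).map (fun j => PySem.List.pyGetD l j 0)

theorem Set_len_ofList (u : List Int) :
    PySem.Set.len (PySem.Set.ofList u) = (DN u : Int) := rfl

theorem winA_append (l : List Int) (a c : Int) (h : a ≤ c) :
    winA l a (c + 1) = winA l a c ++ [PySem.List.pyGetD l c 0] := by
  rw [winA, winA, PySem.List.pyRange_one_succ_right h, List.map_append, List.map_cons,
    List.map_nil]

theorem DN_le_append (w : List Int) (x : Int) : DN w ≤ DN (w ++ [x]) :=
  DN_mono (List.subset_append_left _ _)

-- A's inner loop (range split off at the right end)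
theorem innerA_aux (l : List Int) (a : Int) (acc : Int) (hacc : 0 ≤ acc) :
    ∀ t : Nat,
    (PySem.List.pyRange a (a + (t : Int)) 1).foldl
      (fun (st : PySem.Set Int × Int) j =>
        let s := PySem.Set.add st.1 (PySem.List.pyGetD l j 0)
        (s, max st.2 (PySem.Set.len s)))
      ((PySem.Set.empty : PySem.Set Int), acc)
    = (PySem.Set.ofList (winA l a (a + (t : Int))),
       max acc ((DN (winA l a (a + (t : Int))) : Int))) := by
  intro t
  induction t with
  | zero =>
    rw [show (a + ((0 : Nat) : Int)) = a by push_cast; ring]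
    rw [PySem.List.pyRange_one_eq_nil le_rfl, List.foldl_nil]
    have hw : winA l a a = [] := by
      rw [winA, PySem.List.pyRange_one_eq_nil le_rfl, List.map_nil]
    rw [hw]
    simp only [PySem.Set.ofList]
    rw [show (DN [] : Int) = 0 from rfl, max_eq_left hacc]
    rfl
  | succ t ih =>
    have hle : a ≤ a + (t : Int) := by omega
    rw [show (a + ((t + 1 : Nat) : Int)) = (a + (t : Int)) + 1 by push_cast; ring]
    rw [PySem.List.pyRange_one_succ_right hle, List.foldl_append, ih, List.foldl_cons,
      List.foldl_nil, winA_append l a _ hle]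
    have hca : PySem.Set.add (PySem.Set.ofList (winA l a (a + (t : Int))))
        (PySem.List.pyGetD l (a + (t : Int)) 0)
        = PySem.Set.ofList (winA l a (a + (t : Int)) ++ [PySem.List.pyGetD l (a + (t : Int)) 0]) :=
      (PySem.Set.ofList_append_singleton _ _).symm
    simp only [hca, Set_len_ofList]
    have hmono := DN_le_append (winA l a (a + (t : Int))) (PySem.List.pyGetD l (a + (t : Int)) 0)
    refine Prod.ext rfl ?_
    simp only
    omega

theorem innerA (l : List Int) (a b : Int) (acc : Int) (hacc : 0 ≤ acc) :
    (PySem.List.pyRange a b 1).foldl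
      (fun (st : PySem.Set Int × Int) j =>
        let s := PySem.Set.add st.1 (PySem.List.pyGetD l j 0)
        (s, max st.2 (PySem.Set.len s)))
      ((PySem.Set.empty : PySem.Set Int), acc)
    = (PySem.Set.ofList (winA l a b), max acc ((DN (winA l a b) : Int))) := by
  rcases (by omega : a ≤ b ∨ b < a) with hab | hba
  · have hb : b = a + ((b - a).toNat : Int) := by omega
    rw [hb]; exact innerA_aux l a acc hacc _
  · rw [PySem.List.pyRange_one_eq_nil hba.le, List.foldl_nil]
    have hw : winA l a b = [] := by
      rw [winA, PySem.List.pyRange_one_eq_nil hba.le, List.map_nil]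
    rw [hw, show (DN [] : Int) = 0 from rfl, max_eq_left hacc]
    rfl

-- A's value as a fold of maxima over start indices
def Aspec (l : List Int) (r : Int) : Int :=
  (List.range l.length).foldl
    (fun acc (i : Nat) =>
      max acc ((DN (winA l (i : Int) (min (l.length : Int) ((i : Int) + r))) : Int))) 0

theorem outer_aux (l : List Int) (r : Int) :
    ∀ (is : List Nat) (acc : Int), 0 ≤ acc →
      is.foldl (fun acc2 (i : Nat) =>
        ((PySem.List.pyRange (i : Int) (min (l.length : Int) ((i : Int) + r)) 1).foldl
          (fun (st : PySem.Set Int × Int) j =>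
            let s := PySem.Set.add st.1 (PySem.List.pyGetD l j 0)
            (s, max st.2 (PySem.Set.len s)))
          ((PySem.Set.empty : PySem.Set Int), acc2)).2) acc
      = is.foldl (fun acc2 (i : Nat) =>
          max acc2 ((DN (winA l (i : Int) (min (l.length : Int) ((i : Int) + r))) : Int))) acc := by
  intro is
  induction is with
  | nil => intro acc _; rfl
  | cons i rest ih =>
    intro acc hacc
    simp only [List.foldl_cons]
    rw [innerA l _ _ acc hacc]
    exact ih _ (le_trans hacc (le_max_left _ _))

theorem A_eq_Aspec (l : List Int) (r : Int) : max_treasure_locations l r = Aspec l r := by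
  unfold max_treasure_locations Aspec
  simp only [PySem.List.len_eq]
  rw [PySem.List.pyRange_one]
  simp only [sub_zero, Int.toNat_natCast, zero_add]
  rw [List.foldl_map]
  exact outer_aux l r (List.range l.length) 0 le_rfl

-- B's window: the last (at most) K elements of the length-m prefix
def winB (l : List Int) (K m : Nat) : List Int := (l.take m).drop (m - K)

-- B's running best as a fold over end indices
def Bspec (l : List Int) (K m : Nat) : Int :=
  (List.range m).foldl
    (fun a j => if K - 1 ≤ j then max a ((DN (winB l K (j + 1)) : Int)) else a) 0

-- B's loop body over a Nat index
def bstep (l : List Int) (k : Int) (st : PySem.Dict Int Int × Int × Int) (j : Nat) :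
    PySem.Dict Int Int × Int × Int :=
  let x := PySem.List.pyGetD l (j : Int) 0
  let counts := st.1.modify x 0 (· + 1)
  let distinct := if counts.getD x 0 == 1 then st.2.1 + 1 else st.2.1
  let cd : PySem.Dict Int Int × Int :=
    if k ≤ (j : Int) then
      let y := PySem.List.pyGetD l ((j : Int) - k) 0
      let counts2 := counts.modify y 0 (· - 1)
      (counts2, if counts2.getD y 0 == 0 then distinct - 1 else distinct)
    else (counts, distinct)
  let best := if k - 1 ≤ (j : Int) then max st.2.2 cd.2 else st.2.2
  (cd.1, cd.2, best)

theorem B_eq_fold (l : List Int) (r : Int) (h : ¬ min r (l.length : Int) ≤ 0) :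
    max_treasure_locations_alt l r
    = ((List.range l.length).foldl (bstep l (min r (l.length : Int)))
        ((PySem.Dict.empty : PySem.Dict Int Int), 0, 0)).2.2 := by
  unfold max_treasure_locations_alt
  simp only [PySem.List.len_eq]
  rw [if_neg h]
  rw [PySem.List.enumerate_eq_map_pyRange l 0]
  rw [List.foldl_map]
  rw [PySem.List.pyRange_one]
  simp only [PySem.List.len_eq, sub_zero, Int.toNat_natCast, zero_add]
  rw [List.foldl_map]
  rfl

theorem take_succ_getD (l : List Int) (m : Nat) (hm : m < l.length) :
    l.take (m + 1) = l.take m ++ [l.getD m 0] := by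
  rw [List.take_add_one, List.getElem?_eq_getElem hm, List.getD_eq_getElem l 0 hm]
  rfl

theorem winB_succ_lt (l : List Int) (K m : Nat) (hm : m < l.length) (hmK : m < K) :
    winB l K (m + 1) = winB l K m ++ [l.getD m 0] := by
  have h1 : m - K = 0 := by omega
  have h2 : m + 1 - K = 0 := by omega
  simp only [winB, h1, h2, List.drop_zero]
  exact take_succ_getD l m hm

theorem winB_succ_ge (l : List Int) (K m : Nat) (hm : m < l.length) (hKm : K ≤ m) :
    winB l K m ++ [l.getD m 0] = l.getD (m - K) 0 :: winB l K (m + 1) := by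
  have hlen1 : (l.take (m + 1)).length = m + 1 := by rw [List.length_take]; omega
  have h1 : winB l K m ++ [l.getD m 0] = (l.take (m + 1)).drop (m - K) := by
    rw [take_succ_getD l m hm,
      List.drop_append_of_le_length (by rw [List.length_take]; omega : m - K ≤ (l.take m).length)]
    rfl
  have hlt : m - K < (l.take (m + 1)).length := by omega
  have h2 := List.drop_eq_getElem_cons hlt
  rw [h1, h2, List.getElem_take, winB, show m - K + 1 = m + 1 - K by omega,
    List.getD_eq_getElem l 0 (by omega : m - K < l.length)]

theorem Bspec_succ (l : List Int) (K m : Nat) :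
    Bspec l K (m + 1)
      = if K - 1 ≤ m then max (Bspec l K m) ((DN (winB l K (m + 1)) : Int))
        else Bspec l K m := by
  rw [Bspec, Bspec, List.range_succ, List.foldl_append, List.foldl_cons, List.foldl_nil]

-- one step of B's loop
theorem bstep_eval (l : List Int) (K : Nat) (_hK1 : 1 ≤ K) (m : Nat) (hm : m < l.length)
    (C : PySem.Dict Int Int) (b : Int)
    (hcnt : ∀ z, C.getD z 0 = ((winB l K m).count z : Int)) :
    ∃ C', bstep l (K : Int) (C, ((DN (winB l K m) : Int)), b) m
      = (C', ((DN (winB l K (m + 1)) : Int)),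
          if (K : Int) - 1 ≤ (m : Int) then max b ((DN (winB l K (m + 1)) : Int)) else b)
      ∧ ∀ z, C'.getD z 0 = ((winB l K (m + 1)).count z : Int) := by
  set x := l.getD m 0 with hx
  have hpg : PySem.List.pyGetD l (m : Int) 0 = x := by rw [PySem.List.pyGetD_natCast]
  set w := winB l K m with hw
  have hcnt1 : ∀ z, (C.modify x 0 (· + 1)).getD z 0 = ((w ++ [x]).count z : Int) := by
    intro z
    rw [PySem.Dict.getD_modify]
    by_cases hz : z = x
    · subst hz
      rw [if_pos rfl, hcnt]
      simp only [List.count_append, List.count_cons, List.count_nil, beq_self_eq_true,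
        if_true]
      push_cast; ring
    · have hxz : (x == z) = false := by simp [Ne.symm hz]
      rw [if_neg hz, hcnt]
      simp [List.count_append, List.count_cons, hxz]
  have hDN1 : (if (C.modify x 0 (· + 1)).getD x 0 == 1
        then ((DN w : Int)) + 1 else ((DN w : Int)))
      = ((DN (w ++ [x]) : Int)) := by
    rw [hcnt1 x]
    by_cases hxw : x ∈ w
    · have h1 : 0 < w.count x := List.count_pos_iff.mpr hxw
      rw [if_neg (by simp only [List.count_append, List.count_cons, List.count_nil,
            beq_self_eq_true, if_true, beq_iff_eq]; push_cast; omega),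
        DN_append, if_pos hxw]
    · have h0 : w.count x = 0 := List.count_eq_zero.mpr hxw
      rw [if_pos (by simp only [List.count_append, List.count_cons, List.count_nil,
            beq_self_eq_true, if_true, beq_iff_eq, h0]; push_cast),
        DN_append, if_neg hxw]
      push_cast; ring
  by_cases hKm : K ≤ m
  · have hKmI : ((K : Nat) : Int) ≤ (m : Int) := by omega
    set y := l.getD (m - K) 0 with hy
    have hpg2 : PySem.List.pyGetD l ((m : Int) - (K : Int)) 0 = y := by
      rw [show (m : Int) - (K : Int) = ((m - K : Nat) : Int) by omega,
        PySem.List.pyGetD_natCast]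
    have hsplit : w ++ [x] = y :: winB l K (m + 1) := winB_succ_ge l K m hm hKm
    set w' := winB l K (m + 1) with hw'
    have hcnt2 : ∀ z, ((C.modify x 0 (· + 1)).modify y 0 (· - 1)).getD z 0
        = (w'.count z : Int) := by
      intro z
      rw [PySem.Dict.getD_modify]
      by_cases hz : z = y
      · subst hz
        rw [if_pos rfl, hcnt1, hsplit]
        simp only [List.count_cons, beq_self_eq_true, if_true]
        push_cast; ring
      · have hyz : (y == z) = false := by simp [Ne.symm hz]
        rw [if_neg hz, hcnt1, hsplit]
        simp [List.count_cons, hyz]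
    have hDN2 : (if ((C.modify x 0 (· + 1)).modify y 0 (· - 1)).getD y 0 == 0
          then ((DN (w ++ [x]) : Int)) - 1 else ((DN (w ++ [x]) : Int)))
        = ((DN w' : Int)) := by
      rw [hcnt2 y, hsplit, DN_cons]
      by_cases hyw : y ∈ w'
      · have h1 : 0 < w'.count y := List.count_pos_iff.mpr hyw
        rw [if_neg (by simp only [beq_iff_eq]; omega), if_pos hyw]
      · have h0 : w'.count y = 0 := List.count_eq_zero.mpr hyw
        rw [if_pos (by simp [h0]), if_neg hyw]
        push_cast; ring
    refine ⟨(C.modify x 0 (· + 1)).modify y 0 (· - 1), ?_, hcnt2⟩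
    simp only [bstep]
    rw [hpg, hpg2, if_pos hKmI, hDN1, hDN2]
  · have hKmI : ¬ (((K : Nat) : Int) ≤ (m : Int)) := by omega
    have hw2 : winB l K (m + 1) = w ++ [x] := winB_succ_lt l K m hm (by omega)
    have hcnt2 : ∀ z, (C.modify x 0 (· + 1)).getD z 0
        = ((winB l K (m + 1)).count z : Int) := by
      intro z; rw [hw2]; exact hcnt1 z
    refine ⟨C.modify x 0 (· + 1), ?_, hcnt2⟩
    simp only [bstep]
    rw [hw2, hpg, if_neg hKmI, hDN1]

-- the sliding-window invariant
theorem innerB (l : List Int) (K : Nat) (hK1 : 1 ≤ K) (_hKn : K ≤ l.length) :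
    ∀ m : Nat, m ≤ l.length →
      ∃ C : PySem.Dict Int Int,
        (List.range m).foldl (bstep l (K : Int)) ((PySem.Dict.empty : PySem.Dict Int Int), 0, 0)
          = (C, ((DN (winB l K m) : Int)), Bspec l K m)
        ∧ ∀ z : Int, C.getD z 0 = ((winB l K m).count z : Int) := by
  intro m
  induction m with
  | zero =>
    intro _
    refine ⟨PySem.Dict.empty, ?_, fun z => ?_⟩
    · rw [show winB l K 0 = [] from by simp [winB]]
      rfl
    rw [show winB l K 0 = [] from by simp [winB]]
    rfl
  | succ m ih =>
    intro hm1
    have hm : m < l.length := by omega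
    obtain ⟨C, hC, hcnt⟩ := ih (by omega)
    obtain ⟨C', hstep, hcnt'⟩ := bstep_eval l K hK1 m hm C (Bspec l K m) hcnt
    refine ⟨C', ?_, hcnt'⟩
    rw [List.range_succ, List.foldl_append, hC, List.foldl_cons, List.foldl_nil, hstep,
      Bspec_succ]
    by_cases hc : K - 1 ≤ m
    · rw [if_pos hc, if_pos (by omega : ((K : Nat) : Int) - 1 ≤ (m : Int))]
    · rw [if_neg hc, if_neg (by omega : ¬ (((K : Nat) : Int) - 1 ≤ (m : Int)))]

-- fold-of-max upper bound
theorem foldl_max_le (g : Nat → Int) :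
    ∀ (is : List Nat) (acc c : Int), acc ≤ c → (∀ i ∈ is, g i ≤ c) →
      is.foldl (fun a i => max a (g i)) acc ≤ c := by
  intro is
  induction is with
  | nil => intro acc c hac _; exact hac
  | cons i rest ih =>
    intro acc c hac hall
    simp only [List.foldl_cons]
    exact ih _ _ (max_le hac (hall i List.mem_cons_self))
      (fun j hj => hall j (List.mem_cons_of_mem _ hj))

theorem winA_eq_drop_take (l : List Int) (a b : Int) (ha : 0 ≤ a)
    (hb : b ≤ (l.length : Int)) :
    winA l a b = (l.drop a.toNat).take (b - a).toNat := by
  apply List.ext_getElem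
  · simp only [winA, List.length_map, PySem.List.length_pyRange_one, List.length_take,
      List.length_drop]
    omega
  · intro k h1 h2
    simp only [winA, List.length_map, PySem.List.length_pyRange_one] at h1
    simp only [winA, List.getElem_map, PySem.List.getElem_pyRange_one, List.getElem_take,
      List.getElem_drop]
    rw [show a + (k : Int) = ((a.toNat + k : Nat) : Int) by omega,
      PySem.List.pyGetD_natCast, List.getD_eq_getElem l 0 (by omega)]

-- the two maxima agree (main combinatorial step)
theorem Aspec_eq_Bspec (l : List Int) (r : Int) (K : Nat)
    (hKr : (K : Int) = min r (l.length : Int)) (hK1 : 1 ≤ K) :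
    Aspec l r = Bspec l K l.length := by
  have hKn : K ≤ l.length := by omega
  have hwinA : ∀ i : Nat, i + K ≤ l.length →
      winA l (i : Int) (min (l.length : Int) ((i : Int) + r)) = (l.drop i).take K := by
    intro i hi
    rw [winA_eq_drop_take l (i : Int) _ (by omega) (min_le_left _ _),
      show ((i : Int)).toNat = i from by omega,
      show (min (l.length : Int) ((i : Int) + r) - (i : Int)).toNat = K from by omega]
  have hwinA2 : ∀ i : Nat, i < l.length → l.length < i + K →
      winA l (i : Int) (min (l.length : Int) ((i : Int) + r)) = l.drop i := by
    intro i h1 h2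
    rw [winA_eq_drop_take l (i : Int) _ (by omega) (min_le_left _ _),
      show ((i : Int)).toNat = i from by omega,
      show (min (l.length : Int) ((i : Int) + r) - (i : Int)).toNat = l.length - i from by omega,
      List.take_of_length_le (by simp [List.length_drop])]
  have hwinB : ∀ j : Nat, K ≤ j + 1 → winB l K (j + 1) = (l.drop (j + 1 - K)).take K := by
    intro j hj
    rw [winB, List.drop_take, show (j + 1) - (j + 1 - K) = K from by omega]
  have hB : Bspec l K l.length
      = ((List.range l.length).filter (fun j => decide (K - 1 ≤ j))).foldl
          (fun a j => max a ((DN (winB l K (j + 1)) : Int))) 0 := by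
    rw [Bspec, PySem.List.foldl_ite_eq_foldl_filter (p := fun j => K - 1 ≤ j)]
  rw [Aspec, hB]
  apply le_antisymm
  · apply foldl_max_le _ _ _ _
      (PySem.List.le_foldl_max_int _ (fun j => ((DN (winB l K (j + 1)) : Int))) 0).1
    intro i hi
    rw [List.mem_range] at hi
    by_cases hik : i + K ≤ l.length
    · have hmem : i + K - 1 ∈ (List.range l.length).filter (fun j => decide (K - 1 ≤ j)) := by
        simp only [List.mem_filter, List.mem_range, decide_eq_true_eq]
        omega
      have hval := (PySem.List.le_foldl_max_int _
        (fun j => ((DN (winB l K (j + 1)) : Int))) 0).2 _ hmem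
      rw [hwinB (i + K - 1) (by omega), show i + K - 1 + 1 - K = i from by omega] at hval
      rw [hwinA i hik]
      exact hval
    · rw [hwinA2 i hi (by omega)]
      have hsub : l.drop i ⊆ l.drop (l.length - K) := by
        have h := List.drop_subset (i - (l.length - K)) (l.drop (l.length - K))
        rw [List.drop_drop, show l.length - K + (i - (l.length - K)) = i from by omega] at h
        exact h
      have hmem : l.length - 1 ∈ (List.range l.length).filter (fun j => decide (K - 1 ≤ j)) := by
        simp only [List.mem_filter, List.mem_range, decide_eq_true_eq]
        omega
      have hval := (PySem.List.le_foldl_max_int _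
        (fun j => ((DN (winB l K (j + 1)) : Int))) 0).2 _ hmem
      rw [hwinB (l.length - 1) (by omega),
        show l.length - 1 + 1 - K = l.length - K from by omega,
        List.take_of_length_le (by rw [List.length_drop]; omega)] at hval
      exact le_trans (by exact_mod_cast DN_mono hsub) hval
  · apply foldl_max_le _ _ _ _
      (PySem.List.le_foldl_max_int _
        (fun (i : Nat) => ((DN (winA l (i : Int) (min (l.length : Int) ((i : Int) + r))) : Int)))
        0).1
    intro j hj
    simp only [List.mem_filter, List.mem_range, decide_eq_true_eq] at hj
    have hval := (PySem.List.le_foldl_max_int (List.range l.length)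
      (fun (i : Nat) => ((DN (winA l (i : Int) (min (l.length : Int) ((i : Int) + r))) : Int)))
      0).2 (j + 1 - K) (by simp only [List.mem_range]; omega)
    rw [hwinA (j + 1 - K) (by omega)] at hval
    rw [hwinB j (by omega)]
    exact hval

theorem foldl_max_zero :
    ∀ (is : List Nat) (acc : Int), 0 ≤ acc →
      is.foldl (fun a (_ : Nat) => max a (0 : Int)) acc = acc := by
  intro is
  induction is with
  | nil => intro acc _; rfl
  | cons i rest ih =>
    intro acc hacc
    simp only [List.foldl_cons, max_eq_left hacc]
    exact ih acc hacc

theorem Aspec_zero (l : List Int) (r : Int) (h : min r (l.length : Int) ≤ 0) :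
    Aspec l r = 0 := by
  rcases Nat.eq_zero_or_pos l.length with h0 | hpos
  · rw [Aspec, h0]
    rfl
  · rw [Aspec]
    have hcong : (List.range l.length).foldl
        (fun acc (i : Nat) =>
          max acc ((DN (winA l (i : Int) (min (l.length : Int) ((i : Int) + r))) : Int))) 0
        = (List.range l.length).foldl (fun a (_ : Nat) => max a (0 : Int)) 0 :=
      PySem.List.foldl_congr_mem _ _ _ _ (by
        intro acc i _
        rw [show winA l (i : Int) (min (l.length : Int) ((i : Int) + r)) = [] from by
          rw [winA, PySem.List.pyRange_one_eq_nil (by omega), List.map_nil]]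
        rfl)
    rw [hcong]
    exact foldl_max_zero _ 0 le_rfl

-- ===== VERDICT (by name: the statement is the Claim_ definition above) =====
theorem max_treasure_locations_spec : Claim_equal_max_treasure_locations := by
  intro l r _
  unfold Spec_max_treasure_locations
  rw [A_eq_Aspec]
  by_cases h : min r (l.length : Int) ≤ 0
  · rw [Aspec_zero l r h]
    unfold max_treasure_locations_alt
    simp only [PySem.List.len_eq]
    rw [if_pos (by exact h)]
  · have hK : ((min r (l.length : Int)).toNat : Int) = min r (l.length : Int) := by omega
    have h1 : 1 ≤ (min r (l.length : Int)).toNat := by omega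
    have hn : (min r (l.length : Int)).toNat ≤ l.length := by omega
    obtain ⟨C, hfold, _⟩ := innerB l _ h1 hn l.length le_rfl
    rw [hK] at hfold
    rw [Aspec_eq_Bspec l r _ hK h1]
    rw [B_eq_fold l r h]
    rw [hfold]
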